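-- pv_equiv track=rewrite | github.com/Dragolone/INFO1113-Java- | Desktop/INFO1110/home/input_parser.py | check_Receiver_symbol
-- ===== SOURCE A (Python) =====
-- def check_Receiver_symbol(user_symbol2):
--     target_symbol2 = ["R0", "R1", "R2", "R3", "R4", "R5", "R6", "R7", "R8", "R9"]
--     index = 0
--     while index < len(target_symbol2):
--         if user_symbol2 == target_symbol2[index]:
--             return True
--         index += 1
--     return False
-- ===== SOURCE B (Python) =====
-- def check_Receiver_symbol(user_symbol2):
--     return (isinstance(user_symbol2, str)
--             and len(user_symbol2) == 2
--             and user_symbol2[0] == 'R'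
--             and user_symbol2[1] in '0123456789')
-- ===== Notes on version B (the rewrite author's own statement) =====
-- stated objective: idiomatic
-- what changed: B replaces A's while-loop linear scan over a 10-element table of literals with a closed-form structural check of the two characters (length 2, first char 'R', second char a digit).
import Mathlib
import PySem

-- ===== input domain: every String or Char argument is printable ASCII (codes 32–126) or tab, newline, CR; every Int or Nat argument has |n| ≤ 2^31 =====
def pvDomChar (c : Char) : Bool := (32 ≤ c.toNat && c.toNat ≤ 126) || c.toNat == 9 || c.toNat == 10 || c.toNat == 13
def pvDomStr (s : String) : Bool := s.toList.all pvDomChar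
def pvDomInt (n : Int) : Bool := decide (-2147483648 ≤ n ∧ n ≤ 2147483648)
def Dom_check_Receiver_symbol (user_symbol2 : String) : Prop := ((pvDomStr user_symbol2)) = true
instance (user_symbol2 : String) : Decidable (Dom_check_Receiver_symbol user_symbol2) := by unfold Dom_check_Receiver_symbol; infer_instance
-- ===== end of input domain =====

-- B replaces A's while-loop scan of a 10-element literal table by a closed-form
-- structural check of the two characters (idiomatic; same cost in practice).

-- ===== PORT A =====
-- the while loop of A: index runs over the table until a match or the end
def pvLoopA (u : String) (target : List String) (index : Nat) : Bool :=
  if h : index < target.length then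
    if u == target[index] then true else pvLoopA u target (index + 1)
  else false
termination_by target.length - index

def check_Receiver_symbol (user_symbol2 : String) : Bool :=
  let target_symbol2 := ["R0", "R1", "R2", "R3", "R4", "R5", "R6", "R7", "R8", "R9"]
  pvLoopA user_symbol2 target_symbol2 0

-- ===== PORT B =====
def check_Receiver_symbol_alt (user_symbol2 : String) : Bool :=
  match user_symbol2.toList with
  | [c0, c1] => c0 == 'R' && ("0123456789".toList.contains c1)
  | _ => false

-- ===== PRECONDITION & SPEC =====
def Spec_check_Receiver_symbol (user_symbol2 : String) (out : Bool) : Prop := out = check_Receiver_symbol_alt user_symbol2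
instance (user_symbol2 : String) (out : Bool) : Decidable (Spec_check_Receiver_symbol user_symbol2 out) := by unfold Spec_check_Receiver_symbol; infer_instance

-- ===== CLAIM (what is proved, stated in full; the proofs are below) =====
def Claim_equal_check_Receiver_symbol : Prop := ∀ (user_symbol2 : String), Dom_check_Receiver_symbol user_symbol2 → Spec_check_Receiver_symbol user_symbol2 (check_Receiver_symbol user_symbol2)

-- ===== LEMMAS AND PROOFS =====

lemma beq_toList (u v : String) : (u == v) = (u.toList == v.toList) := by
  by_cases h : u = v
  · subst h; simp
  · have h2 : u.toList ≠ v.toList := fun hh => h (String.toList_inj.mp hh)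
    simp [h, h2]

lemma loopA_eval (u : String) :
    check_Receiver_symbol u =
      (u == "R0" || u == "R1" || u == "R2" || u == "R3" || u == "R4" ||
       u == "R5" || u == "R6" || u == "R7" || u == "R8" || u == "R9") := by
  unfold check_Receiver_symbol
  rw [pvLoopA, pvLoopA, pvLoopA, pvLoopA, pvLoopA, pvLoopA, pvLoopA, pvLoopA,
      pvLoopA, pvLoopA, pvLoopA]
  simp only [List.length_cons, List.length_nil]
  norm_num
  by_cases h0 : u = "R0" <;> by_cases h1 : u = "R1" <;> by_cases h2 : u = "R2" <;>
    by_cases h3 : u = "R3" <;> by_cases h4 : u = "R4" <;> by_cases h5 : u = "R5" <;>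
    by_cases h6 : u = "R6" <;> by_cases h7 : u = "R7" <;> by_cases h8 : u = "R8" <;>
    by_cases h9 : u = "R9" <;> simp_all

-- ===== VERDICT (by name: the statement is the Claim_ definition above) =====
theorem check_Receiver_symbol_spec : Claim_equal_check_Receiver_symbol := by
  intro u _
  unfold Spec_check_Receiver_symbol check_Receiver_symbol_alt
  rw [loopA_eval]
  rcases hl : u.toList with _ | ⟨c0, _ | ⟨c1, _ | ⟨c2, l⟩⟩⟩ <;>
    simp only [beq_toList, hl]
  · simp
  · simp
  · by_cases hR : c0 = 'R' <;>
      simp_all [Bool.or_assoc, Bool.and_or_distrib_left, List.contains_eq_mem,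
        List.mem_cons, beq_eq_decide]
  · simp
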